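-- pv_equiv track=rewrite | github.com/KTD-RYAN-SOUSA/kartado-changelog | helpers/extra_hours.py | _split_extra_day_night
-- ===== SOURCE A (Python) =====
-- NIGHT_START_MINUTES = 22 * 60  # 22:00
--
-- NIGHT_END_MINUTES = 5 * 60  # 05:00
--
-- def _is_night_minute(minute):
--     """Checks if a normalized minute (0-1439) falls in the night period (22:00-05:00)."""
--     norm = minute % (24 * 60)
--     return norm >= NIGHT_START_MINUTES or norm < NIGHT_END_MINUTES
--
-- def _split_day_night_minutes(start_mins, end_mins):
--     """Splits a time range into day and night minutes."""
--     if start_mins is None or end_mins is None: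
--         return 0, 0
--
--     if end_mins <= start_mins:
--         end_mins += 24 * 60
--
--     day_mins = 0
--     night_mins = 0
--     for m in range(start_mins, end_mins):
--         if _is_night_minute(m):
--             night_mins += 1
--         else:
--             day_mins += 1
--
--     return day_mins, night_mins
--
-- def _period_minutes(start_mins, end_mins):
--     """Calculates total minutes for a period, handling midnight crossing."""
--     delta = end_mins - start_mins
--     if delta < 0:
--         delta += 24 * 60
--     return delta
--
-- def _overlap_interval(w_s, w_e, p_s, p_e):
--     """
--     Returns the actual overlap interval (start, end) between a worked and a planned
--     interval, handling midnight crossing via the same shift strategy as _calc_overlap.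
--     Returns None if there is no overlap.
--     """
--     if w_e <= w_s:
--         w_e += 24 * 60
--     if p_e <= p_s:
--         p_e += 24 * 60
--
--     day = 24 * 60
--     best_ov = 0
--     best_interval = None
--     for shift in (-day, 0, day):
--         ws = w_s + shift
--         we = w_e + shift
--         ov_start = max(ws, p_s)
--         ov_end = min(we, p_e)
--         ov = max(0, ov_end - ov_start)
--         if ov > best_ov:
--             best_ov = ov
--             best_interval = (ov_start, ov_end)
--
--     return best_interval
--
-- def _split_extra_day_night(worked_interval, planned_intervals):
--     """
--     For a single period (morning/afternoon/night), computes extra day/night minutes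
--     and absence minutes using exact interval arithmetic.
--
--     Returns (extra_day_mins, extra_night_mins, absence_mins).
--     """
--     if not worked_interval:
--         total_planned = sum(_period_minutes(s, e) for s, e in planned_intervals)
--         return 0, 0, total_planned
--
--     w_s, w_e = worked_interval
--     if w_e <= w_s:
--         w_e += 24 * 60
--
--     worked_day, worked_night = _split_day_night_minutes(w_s, w_e)
--
--     if not planned_intervals:
--         return worked_day, worked_night, 0
--
--     total_planned = sum(_period_minutes(s, e) for s, e in planned_intervals)
--     overlap_day = 0
--     overlap_night = 0
--     total_overlap = 0
--
--     for p_s, p_e in planned_intervals: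
--         interval = _overlap_interval(w_s, w_e, p_s, p_e)
--         if interval:
--             ov_d, ov_n = _split_day_night_minutes(*interval)
--             overlap_day += ov_d
--             overlap_night += ov_n
--             total_overlap += ov_d + ov_n
--
--     extra_day = max(0, worked_day - overlap_day)
--     extra_night = max(0, worked_night - overlap_night)
--     absence = max(0, total_planned - total_overlap)
--
--     return extra_day, extra_night, absence
-- ===== SOURCE B (Python) =====
-- DAY = 24 * 60
-- NIGHT_START = 22 * 60  # 22:00
-- NIGHT_END = 5 * 60     # 05:00
-- NIGHT_PER_DAY = NIGHT_END + (DAY - NIGHT_START)  # 420 night minutes per day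
--
--
-- def _night_upto(x):
--     """Night minutes (22:00-05:00 band) contained in [0, x), closed form."""
--     d, r = divmod(x, DAY)
--     return NIGHT_PER_DAY * d + min(r, NIGHT_END) + max(0, r - NIGHT_START)
--
--
-- def _day_night_split(s, e):
--     """Day/night minute split of [s, e) in O(1).
--
--     An end at or before the start is taken to cross midnight; a range that is
--     still empty after that shift has nothing to count.
--     """
--     if e <= s:
--         e += DAY
--     if e <= s:
--         return 0, 0
--     night = _night_upto(e) - _night_upto(s)
--     return (e - s) - night, night
--
--
-- def _best_overlap(w_s, w_e, p_s, p_e):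
--     """Largest overlap span between the worked and the planned interval over the
--     three day shifts of the worked one (midnight crossing handled by shifting);
--     None when they do not overlap."""
--     if w_e <= w_s:
--         w_e += DAY
--     if p_e <= p_s:
--         p_e += DAY
--     spans = [(max(w_s + sh, p_s), min(w_e + sh, p_e)) for sh in (-DAY, 0, DAY)]
--     s, e = max(spans, key=lambda span: span[1] - span[0])
--     return (s, e) if s < e else None
--
--
-- def _split_extra_day_night(worked_interval, planned_intervals):
--     total_planned = sum((e - s) + (DAY if e < s else 0) for s, e in planned_intervals)
--
--     if not worked_interval:
--         return 0, 0, total_planned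
--
--     w_s, w_e = worked_interval
--     if w_e <= w_s:
--         w_e += DAY
--
--     worked_day, worked_night = _day_night_split(w_s, w_e)
--
--     if not planned_intervals:
--         return worked_day, worked_night, 0
--
--     overlap_day = 0
--     overlap_night = 0
--     for p_s, p_e in planned_intervals:
--         span = _best_overlap(w_s, w_e, p_s, p_e)
--         if span:
--             d, n = _day_night_split(*span)
--             overlap_day += d
--             overlap_night += n
--
--     return (max(0, worked_day - overlap_day),
--             max(0, worked_night - overlap_night),
--             max(0, total_planned - overlap_day - overlap_night))
-- ===== Notes on version B (the rewrite author's own statement) =====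
-- stated objective: faster
-- what changed: Replaces A's per-minute counting loop over each interval with a closed-form prefix function counting night minutes in [0,x), so each day/night split is O(1) arithmetic, and selects the best overlap shift with max(key=span length) over the three candidate spans instead of a running-best loop.
import Mathlib
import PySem

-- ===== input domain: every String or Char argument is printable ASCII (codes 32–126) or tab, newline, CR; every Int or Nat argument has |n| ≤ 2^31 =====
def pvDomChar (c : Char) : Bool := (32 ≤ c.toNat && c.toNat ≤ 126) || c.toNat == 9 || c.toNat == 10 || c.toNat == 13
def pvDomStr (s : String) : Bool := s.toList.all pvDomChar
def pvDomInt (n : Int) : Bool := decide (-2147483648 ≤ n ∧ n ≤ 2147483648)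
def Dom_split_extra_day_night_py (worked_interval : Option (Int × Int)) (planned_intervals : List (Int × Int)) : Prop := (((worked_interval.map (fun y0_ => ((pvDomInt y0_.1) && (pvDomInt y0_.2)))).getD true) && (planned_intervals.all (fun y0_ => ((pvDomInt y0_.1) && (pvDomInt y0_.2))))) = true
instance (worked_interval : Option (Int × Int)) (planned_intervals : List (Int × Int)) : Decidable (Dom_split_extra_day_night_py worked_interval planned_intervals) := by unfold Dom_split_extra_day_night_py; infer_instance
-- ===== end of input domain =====

-- B replaces A's per-minute counting loop with closed-form arithmetic (a prefix
-- function for night minutes) and picks the best overlap shift via max-with-key.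

-- ===== PORT A =====
-- _is_night_minute
def pvIsNightMinute (minute : Int) : Bool :=
  let norm := PySem.Int.mod minute (24 * 60)
  decide (norm ≥ 22 * 60) || decide (norm < 5 * 60)

-- _split_day_night_minutes (the 'is None' early return is dead code at every
-- call site reachable from the entry function, which always passes ints; ported over Int)
def pvSplitDayNight (start_mins end_mins : Int) : Int × Int :=
  (PySem.List.pyRange start_mins
      (if end_mins ≤ start_mins then end_mins + 24 * 60 else end_mins) 1).foldl
    (fun (dn : Int × Int) m =>
      if pvIsNightMinute m then (dn.1, dn.2 + 1) else (dn.1 + 1, dn.2)) (0, 0)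

-- _period_minutes
def pvPeriodMinutes (start_mins end_mins : Int) : Int :=
  let delta := end_mins - start_mins
  if delta < 0 then delta + 24 * 60 else delta

-- _overlap_interval
def pvOverlapInterval (w_s w_e p_s p_e : Int) : Option (Int × Int) :=
  let w_e := if w_e ≤ w_s then w_e + 24 * 60 else w_e
  let p_e := if p_e ≤ p_s then p_e + 24 * 60 else p_e
  (([-(24 * 60), 0, (24 * 60)] : List Int).foldl
    (fun (best : Int × Option (Int × Int)) shift =>
      let ws := w_s + shift
      let we := w_e + shift
      let ov_start := max ws p_s
      let ov_end := min we p_e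
      let ov := max 0 (ov_end - ov_start)
      if ov > best.1 then (ov, some (ov_start, ov_end)) else best)
    (0, none)).2

def split_extra_day_night_py (worked_interval : Option (Int × Int)) (planned_intervals : List (Int × Int)) : Int × Int × Int :=
  match worked_interval with
  | none => (0, 0, (planned_intervals.map (fun p => pvPeriodMinutes p.1 p.2)).sum)
  | some (w_s, w_e0) =>
    -- w_e and the (day, night) pair are local variables in the Python; written
    -- inline / by projection here so the proofs can rewrite under them
    if planned_intervals = [] then
      ((pvSplitDayNight w_s (if w_e0 ≤ w_s then w_e0 + 24 * 60 else w_e0)).1,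
       (pvSplitDayNight w_s (if w_e0 ≤ w_s then w_e0 + 24 * 60 else w_e0)).2, 0)
    else
      (max 0 ((pvSplitDayNight w_s (if w_e0 ≤ w_s then w_e0 + 24 * 60 else w_e0)).1 -
          (planned_intervals.foldl
            (fun (acc : Int × Int × Int) p =>
              match pvOverlapInterval w_s (if w_e0 ≤ w_s then w_e0 + 24 * 60 else w_e0) p.1 p.2 with
              | some iv =>
                (acc.1 + (pvSplitDayNight iv.1 iv.2).1, acc.2.1 + (pvSplitDayNight iv.1 iv.2).2,
                 acc.2.2 + (pvSplitDayNight iv.1 iv.2).1 + (pvSplitDayNight iv.1 iv.2).2)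
              | none => acc) (0, 0, 0)).1),
       max 0 ((pvSplitDayNight w_s (if w_e0 ≤ w_s then w_e0 + 24 * 60 else w_e0)).2 -
          (planned_intervals.foldl
            (fun (acc : Int × Int × Int) p =>
              match pvOverlapInterval w_s (if w_e0 ≤ w_s then w_e0 + 24 * 60 else w_e0) p.1 p.2 with
              | some iv =>
                (acc.1 + (pvSplitDayNight iv.1 iv.2).1, acc.2.1 + (pvSplitDayNight iv.1 iv.2).2,
                 acc.2.2 + (pvSplitDayNight iv.1 iv.2).1 + (pvSplitDayNight iv.1 iv.2).2)
              | none => acc) (0, 0, 0)).2.1),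
       max 0 ((planned_intervals.map (fun p => pvPeriodMinutes p.1 p.2)).sum -
          (planned_intervals.foldl
            (fun (acc : Int × Int × Int) p =>
              match pvOverlapInterval w_s (if w_e0 ≤ w_s then w_e0 + 24 * 60 else w_e0) p.1 p.2 with
              | some iv =>
                (acc.1 + (pvSplitDayNight iv.1 iv.2).1, acc.2.1 + (pvSplitDayNight iv.1 iv.2).2,
                 acc.2.2 + (pvSplitDayNight iv.1 iv.2).1 + (pvSplitDayNight iv.1 iv.2).2)
              | none => acc) (0, 0, 0)).2.2))

-- ===== PORT B =====
-- _night_upto: night minutes in [0, x), closed form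
def pvNightUpto (x : Int) : Int :=
  let d := PySem.Int.floordiv x 1440
  let r := PySem.Int.mod x 1440
  420 * d + min r 300 + max 0 (r - 1320)

-- _day_night_split
def pvDayNightSplit (s e : Int) : Int × Int :=
  let e := if e ≤ s then e + 1440 else e
  if e ≤ s then (0, 0)
  else
    let night := pvNightUpto e - pvNightUpto s
    ((e - s) - night, night)

-- _best_overlap
def pvBestOverlap (w_s w_e p_s p_e : Int) : Option (Int × Int) :=
  let w_e := if w_e ≤ w_s then w_e + 1440 else w_e
  let p_e := if p_e ≤ p_s then p_e + 1440 else p_e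
  let spans := ([-1440, 0, 1440] : List Int).map
    (fun sh => (max (w_s + sh) p_s, min (w_e + sh) p_e))
  match PySem.List.max? spans (fun span => span.2 - span.1) with
  | some span => if span.1 < span.2 then some span else none
  | none => none   -- unreachable: spans is nonempty

-- the body of B's accumulation loop over planned intervals
def pvOvStepB (w_s w_e : Int) (acc : Int × Int) (p : Int × Int) : Int × Int :=
  match pvBestOverlap w_s w_e p.1 p.2 with
  | some span =>
    let dn := pvDayNightSplit span.1 span.2
    (acc.1 + dn.1, acc.2 + dn.2)
  | none => acc

def split_extra_day_night_py_alt (worked_interval : Option (Int × Int)) (planned_intervals : List (Int × Int)) : Int × Int × Int :=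
  let total_planned := (planned_intervals.map
    (fun p => (p.2 - p.1) + (if p.2 < p.1 then 1440 else 0))).sum
  match worked_interval with
  | none => (0, 0, total_planned)
  | some (w_s, w_e0) =>
    let w_e := if w_e0 ≤ w_s then w_e0 + 1440 else w_e0
    let wd := pvDayNightSplit w_s w_e
    if planned_intervals = [] then (wd.1, wd.2, 0)
    else
      let ov := planned_intervals.foldl (pvOvStepB w_s w_e) (0, 0)
      (max 0 (wd.1 - ov.1), max 0 (wd.2 - ov.2), max 0 (total_planned - ov.1 - ov.2))

-- ===== PRECONDITION & SPEC =====
def Spec_split_extra_day_night_py (worked_interval : Option (Int × Int)) (planned_intervals : List (Int × Int)) (out : Int × Int × Int) : Prop := out = split_extra_day_night_py_alt worked_interval planned_intervals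
instance (worked_interval : Option (Int × Int)) (planned_intervals : List (Int × Int)) (out : Int × Int × Int) : Decidable (Spec_split_extra_day_night_py worked_interval planned_intervals out) := by unfold Spec_split_extra_day_night_py; infer_instance

-- ===== CLAIM (what is proved, stated in full; the proofs are below) =====
def Claim_equal_split_extra_day_night_py : Prop := ∀ (worked_interval : Option (Int × Int)) (planned_intervals : List (Int × Int)), Dom_split_extra_day_night_py worked_interval planned_intervals → Spec_split_extra_day_night_py worked_interval planned_intervals (split_extra_day_night_py worked_interval planned_intervals)

-- ===== LEMMAS AND PROOFS =====

-- one step of the closed-form prefix function: it counts exactly A's night test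
lemma pvNightUpto_succ (x : Int) :
    pvNightUpto (x + 1) = pvNightUpto x + (if pvIsNightMinute x then 1 else 0) := by
  unfold pvNightUpto pvIsNightMinute
  simp only [PySem.Int.floordiv_eq_ediv_of_pos (by norm_num : (0:Int) < 1440),
             PySem.Int.mod_eq_emod_of_pos (by norm_num : (0:Int) < 1440)]
  norm_num
  split_ifs <;> omega

-- A's per-minute loop, from any accumulator, in closed form
lemma pvCount_loop (n : Nat) : ∀ (s : Int) (d0 n0 : Int),
    (PySem.List.pyRange s (s + n) 1).foldl
      (fun (dn : Int × Int) m =>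
        if pvIsNightMinute m then (dn.1, dn.2 + 1) else (dn.1 + 1, dn.2)) (d0, n0)
    = (d0 + ((n : Int) - (pvNightUpto (s + n) - pvNightUpto s)),
       n0 + (pvNightUpto (s + n) - pvNightUpto s)) := by
  induction n with
  | zero =>
    intro s d0 n0
    rw [PySem.List.pyRange_one_eq_nil (by omega)]
    simp
  | succ k ih =>
    intro s d0 n0
    have harg : s + ((k + 1 : Nat) : Int) = (s + (k : Int)) + 1 := by push_cast; ring
    rw [harg, PySem.List.pyRange_one_succ_right (by omega), List.foldl_append, ih s d0 n0]
    have hstep := pvNightUpto_succ (s + (k : Int))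
    simp only [List.foldl]
    by_cases h : pvIsNightMinute (s + (k : Int))
    · rw [if_pos h] at hstep
      simp only [if_pos h]
      refine Prod.ext ?_ ?_ <;> simp <;> omega
    · rw [if_neg h] at hstep
      simp only [Bool.not_eq_true] at h
      simp only [h]
      refine Prod.ext ?_ ?_ <;> simp <;> omega

-- A's _split_day_night_minutes equals B's closed-form split on every input
lemma pvSplitDayNight_eq (s e : Int) : pvSplitDayNight s e = pvDayNightSplit s e := by
  unfold pvSplitDayNight pvDayNightSplit
  have hnum : (if e ≤ s then e + 24 * 60 else e) = (if e ≤ s then e + 1440 else e) := by norm_num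
  rw [hnum]
  set e' : Int := if e ≤ s then e + 1440 else e with he'
  by_cases h : e' ≤ s
  · rw [PySem.List.pyRange_one_eq_nil h]
    simp [h, List.foldl]
  · have hn : e' = s + ((e' - s).toNat : Int) := by omega
    rw [hn, pvCount_loop ((e' - s).toNat) s 0 0]
    simp only [if_neg (by omega : ¬ s + ((e' - s).toNat : Int) ≤ s)]
    rw [← hn]
    have h2 : ((e' - s).toNat : Int) = e' - s := by omega
    rw [h2]
    ring_nf

-- A's strict-improvement scan over three abstract candidate spans equals
-- first-max-with-key plus a nonemptiness test
lemma sel3 (a1 a2 b1 b2 c1 c2 : Int) :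
  (([(max 0 (a2 - a1), ((a1, a2) : Int × Int)), (max 0 (b2 - b1), (b1, b2)), (max 0 (c2 - c1), (c1, c2))] :
      List (Int × Int × Int)).foldl
      (fun best t => if t.1 > best.1 then (t.1, some t.2) else best)
      ((0:Int), (none : Option (Int × Int)))).2
  = match PySem.List.max? ([(a1, a2), (b1, b2), (c1, c2)] : List (Int × Int)) (fun span => span.2 - span.1) with
    | some span => if span.1 < span.2 then some span else none
    | none => none := by
  simp only [List.foldl, PySem.List.max?]
  norm_num
  split_ifs <;> simp_all <;> (try split_ifs <;> simp_all) <;> omega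

-- A's shift-scanning overlap equals B's max-with-key overlap
lemma pvOverlap_eq (w_s w_e p_s p_e : Int) :
    pvOverlapInterval w_s w_e p_s p_e = pvBestOverlap w_s w_e p_s p_e := by
  unfold pvOverlapInterval pvBestOverlap
  have hnum1 : (if w_e ≤ w_s then w_e + 24 * 60 else w_e) = (if w_e ≤ w_s then w_e + 1440 else w_e) := by norm_num
  have hnum2 : (if p_e ≤ p_s then p_e + 24 * 60 else p_e) = (if p_e ≤ p_s then p_e + 1440 else p_e) := by norm_num
  rw [hnum1, hnum2]
  set we : Int := if w_e ≤ w_s then w_e + 1440 else w_e with hwe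
  set pe : Int := if p_e ≤ p_s then p_e + 1440 else p_e with hpe
  have hA : (([-(24 * 60), 0, (24 * 60)] : List Int).foldl
      (fun (best : Int × Option (Int × Int)) shift =>
        let ws := w_s + shift
        let we2 := we + shift
        let ov_start := max ws p_s
        let ov_end := min we2 pe
        let ov := max 0 (ov_end - ov_start)
        if ov > best.1 then (ov, some (ov_start, ov_end)) else best)
      (0, none)).2
      = ((([-(24 * 60), 0, (24 * 60)] : List Int).map (fun sh =>
          (max 0 (min (we + sh) pe - max (w_s + sh) p_s),
           (max (w_s + sh) p_s, min (we + sh) pe)))).foldl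
          (fun (best : Int × Option (Int × Int)) c =>
            if c.1 > best.1 then (c.1, some c.2) else best) (0, none)).2 := by
    rw [List.foldl_map]
  rw [hA]
  simp only [List.map]
  rw [sel3]
  norm_num

-- B's planned-minutes summand equals A's _period_minutes pointwise
lemma pvTotal_eq (l : List (Int × Int)) :
    (l.map (fun p => (p.2 - p.1) + (if p.2 < p.1 then 1440 else 0))).sum
    = (l.map (fun p => pvPeriodMinutes p.1 p.2)).sum := by
  congr 1
  apply List.map_congr_left
  intro p _
  simp only [pvPeriodMinutes]
  split_ifs <;> omega

-- the overlap-accumulation loops agree; A carries a running total as a third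
-- component, which always equals the sum of the two counters' increments
lemma pvOvLoop_eq (w_s w_e : Int) (l : List (Int × Int)) :
    ∀ (d n t : Int),
    l.foldl (fun (acc : Int × Int × Int) p =>
        match pvOverlapInterval w_s w_e p.1 p.2 with
        | some iv =>
          (acc.1 + (pvSplitDayNight iv.1 iv.2).1, acc.2.1 + (pvSplitDayNight iv.1 iv.2).2,
           acc.2.2 + (pvSplitDayNight iv.1 iv.2).1 + (pvSplitDayNight iv.1 iv.2).2)
        | none => acc) (d, n, t)
    = ((l.foldl (pvOvStepB w_s w_e) (d, n)).1,
       (l.foldl (pvOvStepB w_s w_e) (d, n)).2,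
       t + ((l.foldl (pvOvStepB w_s w_e) (d, n)).1 - d)
         + ((l.foldl (pvOvStepB w_s w_e) (d, n)).2 - n)) := by
  induction l with
  | nil => intro d n t; simp
  | cons p l ih =>
    intro d n t
    simp only [List.foldl]
    rw [pvOverlap_eq w_s w_e p.1 p.2]
    rcases hov : pvBestOverlap w_s w_e p.1 p.2 with _ | iv
    · have hstep : pvOvStepB w_s w_e (d, n) p = (d, n) := by
        unfold pvOvStepB; rw [hov]
      simp only [hstep]
      exact ih d n t
    · have hstep : pvOvStepB w_s w_e (d, n) p
          = (d + (pvDayNightSplit iv.1 iv.2).1, n + (pvDayNightSplit iv.1 iv.2).2) := by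
        unfold pvOvStepB; rw [hov]
      simp only [hstep]
      rw [pvSplitDayNight_eq iv.1 iv.2]
      rw [ih (d + (pvDayNightSplit iv.1 iv.2).1) (n + (pvDayNightSplit iv.1 iv.2).2)
            (t + (pvDayNightSplit iv.1 iv.2).1 + (pvDayNightSplit iv.1 iv.2).2)]
      simp only [Prod.mk.injEq]
      exact ⟨trivial, trivial, by omega⟩

-- ===== VERDICT (by name: the statement is the Claim_ definition above) =====
theorem split_extra_day_night_py_spec : Claim_equal_split_extra_day_night_py := by
  intro wi ps _
  unfold Spec_split_extra_day_night_py split_extra_day_night_py split_extra_day_night_py_alt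
  cases wi with
  | none =>
    simp only [pvTotal_eq]
  | some w =>
    rcases w with ⟨ws0, we0⟩
    simp only [pvTotal_eq]
    have hnum : (if we0 ≤ ws0 then we0 + 24 * 60 else we0) = (if we0 ≤ ws0 then we0 + 1440 else we0) := by norm_num
    rw [hnum]
    set we1 : Int := if we0 ≤ ws0 then we0 + 1440 else we0 with hwe1
    by_cases hps : ps = []
    · simp [hps, pvSplitDayNight_eq]
    · simp only [if_neg hps]
      rw [pvOvLoop_eq ws0 we1 ps 0 0 0]
      simp only [pvSplitDayNight_eq, Prod.mk.injEq]
      exact ⟨trivial, trivial, by omega⟩
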